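-- pv_equiv track=rewrite | github.com/eliwangj/deepnlp | DeepNLP/eval/Seg_eval.py | eval_sentence
-- ===== SOURCE A (Python) =====
-- def eval_sentence(y_pred, y, sentence, word2id):
--     words = sentence.split()
--     seg_pred = []
--     word_pred = ''
--
--     if y is not None:
--         word_true = ''
--         seg_true = []
--         for i in range(len(y)):
--             word_true += words[i]
--             if y[i] in ['S', 'E']:
--                 if word_true not in word2id:
--                     word_true = '*' + word_true + '*'
--                 seg_true.append(word_true)
--                 word_true = ''
--         seg_true_str = ' '.join(seg_true)
--     else:
--         seg_true_str = None
--
--     for i in range(len(y_pred)):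
--         word_pred += words[i]
--         if y_pred[i] in ['S', 'E']:
--             seg_pred.append(word_pred)
--             word_pred = ''
--     seg_pred_str = ' '.join(seg_pred)
--     return seg_true_str, seg_pred_str
-- ===== SOURCE B (Python) =====
-- def eval_sentence(y_pred, y, sentence, word2id):
--     words = sentence.split()
--
--     def seg_ends(tags):
--         return [i for i, t in enumerate(tags) if t in ('S', 'E')]
--
--     def piece(lo, hi):
--         s = ''
--         for j in range(lo, hi + 1):
--             s += words[j]
--         return s
--
--     def segments(tags):
--         out, prev = [], -1
--         for e in seg_ends(tags):
--             out.append(piece(prev + 1, e))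
--             prev = e
--         return out
--
--     if y is None:
--         seg_true_str = None
--     else:
--         seg_true_str = ' '.join(
--             w if w in word2id else '*' + w + '*' for w in segments(y))
--     seg_pred_str = ' '.join(segments(y_pred))
--     return seg_true_str, seg_pred_str
-- ===== Notes on version B (the rewrite author's own statement) =====
-- stated objective: alternative
-- what changed: B replaces A's single accumulating pass (running word buffer reset at each S/E tag) by a boundary-index decomposition: one pass collects the indices of S/E tags, then each segment is rebuilt by joining words over the explicit index range between consecutive boundaries, with the word2id '*...*' wrapping applied at join time.
import Mathlib
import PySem

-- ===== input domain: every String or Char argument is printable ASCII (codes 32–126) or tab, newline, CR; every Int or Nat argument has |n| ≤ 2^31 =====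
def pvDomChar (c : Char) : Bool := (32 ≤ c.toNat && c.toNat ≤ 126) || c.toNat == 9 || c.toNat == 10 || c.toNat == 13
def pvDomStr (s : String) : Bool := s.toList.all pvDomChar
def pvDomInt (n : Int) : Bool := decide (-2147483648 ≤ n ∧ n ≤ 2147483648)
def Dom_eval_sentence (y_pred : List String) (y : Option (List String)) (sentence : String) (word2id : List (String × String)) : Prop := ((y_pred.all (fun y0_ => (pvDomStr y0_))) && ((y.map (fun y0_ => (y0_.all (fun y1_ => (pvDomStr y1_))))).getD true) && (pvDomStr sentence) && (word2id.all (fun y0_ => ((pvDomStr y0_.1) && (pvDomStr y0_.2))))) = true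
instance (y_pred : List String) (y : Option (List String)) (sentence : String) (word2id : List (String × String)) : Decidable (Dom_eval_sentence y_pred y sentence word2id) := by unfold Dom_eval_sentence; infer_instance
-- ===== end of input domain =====

-- B rebuilds each segment from the explicit S/E boundary indices instead of A's running
-- accumulator; equivalence is claimed on inputs where A's indexing of words raises no IndexError.

-- ===== PORT A =====
-- words[i] is in range under Pre_; out of range Python raises IndexError (excluded by Pre_),
-- the total port uses the default "" there.
def eval_sentence (y_pred : List String) (y : Option (List String)) (sentence : String) (word2id : List (String × String)) : Option String × String :=
  let words := PySem.Str.split₀ sentence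
  let seg_true_str : Option String :=
    match y with
    | none => none
    | some t =>
      let st := (List.range t.length).foldl
        (fun (st : List String × String) i =>
          let word_true := st.2 ++ PySem.List.pyGetD words (Int.ofNat i) ""
          if PySem.List.pyGetD t (Int.ofNat i) "" == "S" || PySem.List.pyGetD t (Int.ofNat i) "" == "E" then
            let word_true := if word2id.any (fun p => p.1 == word_true) then word_true
                             else "*" ++ word_true ++ "*"
            (st.1 ++ [word_true], "")
          else (st.1, word_true)) ([], "")
      some (PySem.Str.join " " st.1)
  let stp := (List.range y_pred.length).foldl
    (fun (st : List String × String) i =>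
      let word_pred := st.2 ++ PySem.List.pyGetD words (Int.ofNat i) ""
      if PySem.List.pyGetD y_pred (Int.ofNat i) "" == "S" || PySem.List.pyGetD y_pred (Int.ofNat i) "" == "E" then
        (st.1 ++ [word_pred], "")
      else (st.1, word_pred)) ([], "")
  (seg_true_str, PySem.Str.join " " stp.1)

-- ===== PORT B =====
def pvEnds (tags : List String) : List Int :=
  ((PySem.List.enumerate tags 0).filter (fun p => p.2 == "S" || p.2 == "E")).map (·.1)

-- bounded index loop: words[j] for j = lo..hi (default "" outside Pre_'s range guarantee)
def pvPiece (words : List String) (lo hi : Int) : String :=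
  (PySem.List.pyRange lo (hi + 1) 1).foldl (fun s j => s ++ PySem.List.pyGetD words j "") ""

def pvSegFold (words : List String) (tags : List String) : List String × Int :=
  (pvEnds tags).foldl (fun (st : List String × Int) e => (st.1 ++ [pvPiece words (st.2 + 1) e], e)) ([], -1)

def pvSegments (words : List String) (tags : List String) : List String :=
  (pvSegFold words tags).1

def eval_sentence_alt (y_pred : List String) (y : Option (List String)) (sentence : String) (word2id : List (String × String)) : Option String × String :=
  let words := PySem.Str.split₀ sentence
  let seg_true_str : Option String :=
    match y with
    | none => none
    | some t =>
      some (PySem.Str.join " "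
        ((pvSegments words t).map (fun w =>
          if word2id.any (fun p => p.1 == w) then w else "*" ++ w ++ "*")))
  (seg_true_str, PySem.Str.join " " (pvSegments words y_pred))

-- ===== PRECONDITION & SPEC =====
-- Pre_ excludes exactly the inputs where A raises IndexError: a tag sequence longer than
-- the list of whitespace-split words of the sentence.
def Pre_eval_sentence (y_pred : List String) (y : Option (List String)) (sentence : String) (word2id : List (String × String)) : Prop :=
  y_pred.length ≤ (PySem.Str.split₀ sentence).length ∧
  (y.getD []).length ≤ (PySem.Str.split₀ sentence).length
instance (y_pred : List String) (y : Option (List String)) (sentence : String) (word2id : List (String × String)) : Decidable (Pre_eval_sentence y_pred y sentence word2id) := by unfold Pre_eval_sentence; infer_instance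

def pvWitness_eval_sentence : List String × Option (List String) × String × (List (String × String)) :=
  (["B", "E"], some ["S", "S"], "ab c", [("ab", "1")])

def Spec_eval_sentence (y_pred : List String) (y : Option (List String)) (sentence : String) (word2id : List (String × String)) (out : Option String × String) : Prop := out = eval_sentence_alt y_pred y sentence word2id
instance (y_pred : List String) (y : Option (List String)) (sentence : String) (word2id : List (String × String)) (out : Option String × String) : Decidable (Spec_eval_sentence y_pred y sentence word2id out) := by unfold Spec_eval_sentence; infer_instance

-- ===== CLAIM (what is proved, stated in full; the proofs are below) =====
def Claim_equal_eval_sentence : Prop := ∀ (y_pred : List String) (y : Option (List String)) (sentence : String) (word2id : List (String × String)), Dom_eval_sentence y_pred y sentence word2id → Pre_eval_sentence y_pred y sentence word2id → Spec_eval_sentence y_pred y sentence word2id (eval_sentence y_pred y sentence word2id)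

-- ===== LEMMAS AND PROOFS =====

theorem pvEnds_append (ts : List String) (t : String) :
    pvEnds (ts ++ [t]) =
      pvEnds ts ++ (if t == "S" || t == "E" then [(ts.length : Int)] else []) := by
  unfold pvEnds
  rw [PySem.List.enumerate_append]
  simp only [PySem.List.enumerate_cons, PySem.List.enumerate_nil, List.filter_append,
    List.map_append, zero_add]
  by_cases h : (t == "S" || t == "E") = true <;> simp [h]

theorem pvSegFold_append (words ts : List String) (t : String) :
    pvSegFold words (ts ++ [t]) =
      if t == "S" || t == "E" then
        ((pvSegFold words ts).1 ++ [pvPiece words ((pvSegFold words ts).2 + 1) (ts.length : Int)],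
          (ts.length : Int))
      else pvSegFold words ts := by
  unfold pvSegFold
  rw [pvEnds_append]
  by_cases h : (t == "S" || t == "E") = true <;> simp [h, List.foldl_append]

theorem pvSegFold_snd_lt (words ts : List String) :
    -1 ≤ (pvSegFold words ts).2 ∧ (pvSegFold words ts).2 < (ts.length : Int) := by
  induction ts using List.reverseRecOn with
  | nil => simp [pvSegFold, pvEnds, PySem.List.enumerate_nil]
  | append_singleton ts t ih =>
    rw [pvSegFold_append]
    by_cases h : (t == "S" || t == "E") = true <;> simp [h, List.length_append] <;> omega

theorem pvPiece_snoc (words : List String) (lo hi : Int) (h : lo ≤ hi + 1) :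
    pvPiece words lo hi ++ PySem.List.pyGetD words (hi + 1) "" = pvPiece words lo (hi + 1) := by
  unfold pvPiece
  rw [PySem.List.pyRange_one_succ_right h, List.foldl_append]
  simp

theorem main_plain (words ts : List String) :
    (List.range ts.length).foldl
      (fun (st : List String × String) i =>
        let w := st.2 ++ PySem.List.pyGetD words (Int.ofNat i) ""
        if PySem.List.pyGetD ts (Int.ofNat i) "" == "S" || PySem.List.pyGetD ts (Int.ofNat i) "" == "E" then
          (st.1 ++ [w], "")
        else (st.1, w)) ([], "")
    = ((pvSegFold words ts).1, pvPiece words ((pvSegFold words ts).2 + 1) ((ts.length : Int) - 1)) := by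
  induction ts using List.reverseRecOn with
  | nil => simp [pvSegFold, pvEnds, PySem.List.enumerate_nil, pvPiece, PySem.List.pyRange_one_eq_nil]
  | append_singleton ts t ih =>
    have hlt := pvSegFold_snd_lt words ts
    rw [List.length_append, List.length_cons, List.length_nil, zero_add, List.range_succ,
      List.foldl_append]
    have hcongr : (List.range ts.length).foldl
        (fun (st : List String × String) i =>
          let w := st.2 ++ PySem.List.pyGetD words (Int.ofNat i) ""
          if PySem.List.pyGetD (ts ++ [t]) (Int.ofNat i) "" == "S" || PySem.List.pyGetD (ts ++ [t]) (Int.ofNat i) "" == "E" then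
            (st.1 ++ [w], "")
          else (st.1, w)) ([], "")
      = (List.range ts.length).foldl
        (fun (st : List String × String) i =>
          let w := st.2 ++ PySem.List.pyGetD words (Int.ofNat i) ""
          if PySem.List.pyGetD ts (Int.ofNat i) "" == "S" || PySem.List.pyGetD ts (Int.ofNat i) "" == "E" then
            (st.1 ++ [w], "")
          else (st.1, w)) ([], "") := by
      apply PySem.List.foldl_congr_mem
      intro acc i hi
      have hi' : i < ts.length := List.mem_range.mp hi
      have : PySem.List.pyGetD (ts ++ [t]) (Int.ofNat i) "" = PySem.List.pyGetD ts (Int.ofNat i) "" := by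
        simp [Int.ofNat_eq_natCast, PySem.List.pyGetD_natCast, List.getD, List.getElem?_append_left hi']
      rw [this]
    rw [hcongr, ih]
    have hget : PySem.List.pyGetD (ts ++ [t]) (Int.ofNat ts.length) "" = t := by
      simp [Int.ofNat_eq_natCast, PySem.List.pyGetD_natCast, List.getD]
    simp only [List.foldl_cons, List.foldl_nil, hget]
    have e2 : pvPiece words ((ts.length : Int) + 1) ((↑(ts.length + 1) : Int) - 1) = "" := by
      unfold pvPiece
      rw [PySem.List.pyRange_one_eq_nil (by push_cast; omega)]
      rfl
    have hpiece : pvPiece words ((pvSegFold words ts).2 + 1) ((ts.length : Int) - 1) ++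
        PySem.List.pyGetD words (Int.ofNat ts.length) "" =
        pvPiece words ((pvSegFold words ts).2 + 1) (ts.length : Int) := by
      have hp := pvPiece_snoc words ((pvSegFold words ts).2 + 1) ((ts.length : Int) - 1) (by omega)
      have e : ((ts.length : Int) - 1) + 1 = (ts.length : Int) := by omega
      rw [e] at hp
      simpa [Int.ofNat_eq_natCast] using hp
    by_cases h : (t == "S" || t == "E") = true
    · rw [if_pos h, pvSegFold_append words ts t, if_pos h]
      simp only [Prod.mk.injEq]
      refine ⟨by rw [hpiece], e2.symm⟩
    · rw [if_neg h, pvSegFold_append words ts t, if_neg h]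
      simp only [Prod.mk.injEq]
      refine ⟨trivial, ?_⟩
      rw [hpiece]
      have e3 : ((ts.length : Int)) = (↑(ts.length + 1) : Int) - 1 := by push_cast; omega
      rw [← e3]

theorem wrap_fold (wf : String → String) (g : Nat → String) (cond : Nat → Bool)
    (l : List Nat) (B : List String) (w : String) :
    l.foldl (fun (st : List String × String) i =>
        let wt := st.2 ++ g i
        if cond i then (st.1 ++ [wf wt], "") else (st.1, wt)) (B.map wf, w)
    = (((l.foldl (fun (st : List String × String) i =>
          let wt := st.2 ++ g i
          if cond i then (st.1 ++ [wt], "") else (st.1, wt)) (B, w)).1).map wf,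
        (l.foldl (fun (st : List String × String) i =>
          let wt := st.2 ++ g i
          if cond i then (st.1 ++ [wt], "") else (st.1, wt)) (B, w)).2) := by
  induction l generalizing B w with
  | nil => simp
  | cons i l ih =>
    simp only [List.foldl_cons]
    by_cases h : cond i = true
    · simp only [h, if_true]
      have hm : (B.map wf) ++ [wf (w ++ g i)] = (B ++ [w ++ g i]).map wf := by simp
      rw [hm]
      exact ih (B ++ [w ++ g i]) ""
    · simp only [h]
      exact ih B (w ++ g i)

-- ===== VERDICT (by name: the statement is the Claim_ definition above) =====
theorem eval_sentence_spec : Claim_equal_eval_sentence := by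
  intro y_pred y sentence word2id _ _
  unfold Spec_eval_sentence eval_sentence eval_sentence_alt pvSegments
  cases y with
  | none =>
    simp only
    rw [main_plain (PySem.Str.split₀ sentence) y_pred]
  | some t =>
    simp only
    rw [main_plain (PySem.Str.split₀ sentence) y_pred]
    have hw := wrap_fold
      (fun v => if word2id.any (fun p => p.1 == v) then v else "*" ++ v ++ "*")
      (fun i => PySem.List.pyGetD (PySem.Str.split₀ sentence) (Int.ofNat i) "")
      (fun i => PySem.List.pyGetD t (Int.ofNat i) "" == "S" || PySem.List.pyGetD t (Int.ofNat i) "" == "E")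
      (List.range t.length) [] ""
    simp only [List.map_nil] at hw
    rw [hw, main_plain (PySem.Str.split₀ sentence) t]
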